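-- pv_equiv track=rewrite | github.com/strgaltphil/Advent-of-Code | Day10/part2.py | completion_score
-- ===== SOURCE A (Python) =====
-- def completion_score(line):
--     stack = []
--
--     for l in list(line):
--         if l in ["<","(","[","{"]:
--             stack.append(l)
--         else:
--             stack.pop()
--
--     stack = list(reversed(stack))
--     solution = []
--
--     for s in stack:
--         if s == "<":
--             solution.append(">")
--         if s == "(":
--             solution.append(")")
--         if s == "[":
--             solution.append("]")
--         if s == "{":
--             solution.append("}")
--
--     score = 0
--     for s in solution:
--         if s == ">":
--             score = score * 5 + 4
--         if s == ")":
--             score = score * 5 + 1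
--         if s == "]":
--             score = score * 5 + 2
--         if s == "}":
--             score = score * 5 + 3
--     return score
-- ===== SOURCE B (Python) =====
-- def completion_score(line):
--     # no stack: scan right-to-left; a non-opener is a pending closer (skip),
--     # an opener either consumes a pending closer or is unmatched and scores.
--     value = {"(": 1, "[": 2, "{": 3, "<": 4}
--     skip = 0
--     score = 0
--     for c in reversed(line):
--         if c in value:
--             if skip:
--                 skip -= 1
--             else:
--                 score = score * 5 + value[c]
--         else:
--             skip += 1
--     if skip:
--         raise ValueError("line has a closing character that closes nothing")
--     return score
-- ===== Notes on version B (the rewrite author's own statement) =====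
-- stated objective: alternative
-- what changed: B uses no stack at all: it scans the line once from the right with an integer skip-counter (closers increment it, matched openers decrement it) and Horner-accumulates the score directly on the unmatched openers it meets, eliminating A's stack, its reversal and the intermediate closing-character list; on corrupted lines (a closer that closes nothing, where A's blind stack.pop() raises IndexError) B raises ValueError instead - both are outside Pre_.
import Mathlib
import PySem

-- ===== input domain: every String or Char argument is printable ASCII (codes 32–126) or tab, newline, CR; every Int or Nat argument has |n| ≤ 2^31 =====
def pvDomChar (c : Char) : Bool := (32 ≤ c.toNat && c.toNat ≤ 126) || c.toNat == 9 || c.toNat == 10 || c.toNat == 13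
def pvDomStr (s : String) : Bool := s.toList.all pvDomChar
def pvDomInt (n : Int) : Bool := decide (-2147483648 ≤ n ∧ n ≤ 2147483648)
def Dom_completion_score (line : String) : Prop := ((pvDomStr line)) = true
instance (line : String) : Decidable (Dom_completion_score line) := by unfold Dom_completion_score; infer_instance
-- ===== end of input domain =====

-- B drops A's stack entirely: one right-to-left pass with a skip counter, Horner-scoring the
-- unmatched openers directly (same O(n) time, O(1) space; an 'alternative' algorithm, not claimed
-- faster). On corrupted lines (a closer closing nothing) A's blind stack.pop() raises IndexError
-- and B raises ValueError; both lie outside Pre_completion_score.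


-- ===== PORT A =====
-- the stack-building loop; 'none' marks Python's IndexError from stack.pop() on an empty stack
def csStepA (st : Option (List Char)) (c : Char) : Option (List Char) :=
  match st with
  | none => none
  | some s =>
    if c ∈ ['<', '(', '[', '{'] then some (s ++ [c])
    else (PySem.List.pop? s).map (·.2)

def csSolStep (sol : List Char) (s : Char) : List Char :=
  let sol := if s = '<' then sol ++ ['>'] else sol
  let sol := if s = '(' then sol ++ [')'] else sol
  let sol := if s = '[' then sol ++ [']'] else sol
  let sol := if s = '{' then sol ++ ['}'] else sol
  sol

def csScoreStep (score : Int) (s : Char) : Int :=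
  let score := if s = '>' then score * 5 + 4 else score
  let score := if s = ')' then score * 5 + 1 else score
  let score := if s = ']' then score * 5 + 2 else score
  let score := if s = '}' then score * 5 + 3 else score
  score

def completion_score (line : String) : Int :=
  match line.toList.foldl csStepA (some []) with
  | none => 0  -- Python raises IndexError here; excluded by Pre_completion_score
  | some stack0 =>
    let stack := stack0.reverse
    let solution := stack.foldl csSolStep []
    solution.foldl csScoreStep 0

-- ===== PORT B =====
def csValue : PySem.Dict Char Int := PySem.Dict.ofList [('(', 1), ('[', 2), ('{', 3), ('<', 4)]

-- one step of Source B's loop over reversed(line); state = (skip, score)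
def csStepR (st : Int × Int) (c : Char) : Int × Int :=
  match csValue.get? c with
  | some v => if st.1 ≠ 0 then (st.1 - 1, st.2) else (st.1, st.2 * 5 + v)
  | none => (st.1 + 1, st.2)

def completion_score_alt (line : String) : Int :=
  let p := line.toList.reverse.foldl csStepR ((0 : Int), (0 : Int))
  if p.1 ≠ 0 then 0  -- Python raises ValueError here; excluded by Pre_completion_score
  else p.2

-- ===== PRECONDITION & SPEC =====
-- Pre_ excludes exactly the lines on which Python A's stack.pop() hits an empty stack (IndexError):
-- every prefix must contain at most as many non-openers as openers.
def Pre_completion_score (line : String) : Prop :=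
  ∀ n : Nat, n ≤ line.toList.length →
    n ≤ 2 * (line.toList.take n).countP (fun c => decide (c ∈ ['<', '(', '[', '{']))
instance (line : String) : Decidable (Pre_completion_score line) := by
  unfold Pre_completion_score; infer_instance

def pvWitness_completion_score : String := "<([{}])"

def Spec_completion_score (line : String) (out : Int) : Prop := out = completion_score_alt line
instance (line : String) (out : Int) : Decidable (Spec_completion_score line out) := by unfold Spec_completion_score; infer_instance

-- ===== CLAIM (what is proved, stated in full; the proofs are below) =====
def Claim_equal_completion_score : Prop := ∀ (line : String), Dom_completion_score line → Pre_completion_score line → Spec_completion_score line (completion_score line)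
-- ===== LEMMAS AND PROOFS =====
def csVal (c : Char) : Int := if c = '(' then 1 else if c = '[' then 2 else if c = '{' then 3 else 4
def csClose (c : Char) : Char := if c = '<' then '>' else if c = '(' then ')' else if c = '[' then ']' else '}'

-- abstract description of the right-to-left pass: (pending closers, unmatched openers l-to-r)
def duStep (c : Char) (p : Nat × List Char) : Nat × List Char :=
  if c ∈ ['<', '(', '[', '{'] then
    (if p.1 = 0 then (0, c :: p.2) else (p.1 - 1, p.2))
  else (p.1 + 1, p.2)
def du (cs : List Char) : Nat × List Char := cs.foldr duStep (0, [])

def hscore (us : List Char) : Int := us.reverse.foldl (fun s c => s * 5 + csVal c) 0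

theorem csValue_eq : csValue = PySem.Dict.mk [('(', 1), ('[', 2), ('{', 3), ('<', 4)] := by rfl

theorem csValue_get?_none (c : Char) (hc : c ∉ ['<', '(', '[', '{']) : csValue.get? c = none := by
  simp only [List.mem_cons, not_or] at hc
  obtain ⟨h1, h2, h3, h4, _⟩ := hc
  simp [csValue_eq, beq_iff_eq, Ne.symm h1, Ne.symm h2, Ne.symm h3, Ne.symm h4, PySem.Dict.get?]

theorem csValue_get?_some (c : Char) (hc : c ∈ ['<', '(', '[', '{']) : csValue.get? c = some (csVal c) := by
  fin_cases hc <;> rfl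

theorem csStepA_none (cs : List Char) : cs.foldl csStepA none = none := by
  induction cs with
  | nil => rfl
  | cons c cs ih => simpa [csStepA] using ih

-- every element of (du cs).2 is an opener
theorem du_openers (cs : List Char) : ∀ c ∈ (du cs).2, c ∈ ['<', '(', '[', '{'] := by
  induction cs with
  | nil => simp [du]
  | cons c cs ih =>
    intro x hx
    rw [show du (c :: cs) = duStep c (du cs) from rfl, duStep] at hx
    split at hx
    · split at hx
      · rcases List.mem_cons.1 hx with rfl | h
        · assumption
        · exact ih x h
      · exact ih x hx
    · exact ih x hx

-- B's reversed-pass loop computes (du, Horner score of the unmatched openers)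
theorem csStepR_char (cs : List Char) :
    cs.foldr (fun c st => csStepR st c) ((0 : Int), (0 : Int)) = (((du cs).1 : Int), hscore (du cs).2) := by
  induction cs with
  | nil => simp [du, hscore]
  | cons c cs ih =>
    rw [List.foldr_cons, ih, show du (c :: cs) = duStep c (du cs) from rfl, duStep]
    by_cases hc : c ∈ ['<', '(', '[', '{']
    · rw [if_pos hc]
      by_cases hk : (du cs).1 = 0
      · rw [if_pos hk]
        simp [csStepR, csValue_get?_some c hc, hk, hscore]
      · rw [if_neg hk]
        have hne : ((du cs).1 : Int) ≠ 0 := by exact_mod_cast hk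
        simp only [csStepR, csValue_get?_some c hc, hne, ne_eq, not_false_eq_true, if_true]
        rw [Prod.mk.injEq]
        exact ⟨by omega, rfl⟩
    · rw [if_neg hc]
      simp [csStepR, csValue_get?_none c hc]

-- A's stack loop, run from a stack long enough for the pending pops, ends with
-- the untouched bottom of the stack plus the unmatched openers of cs
theorem csA_du (cs : List Char) : ∀ (l : List Char), (du cs).1 ≤ l.length →
    cs.foldl csStepA (some l) = some (l.take (l.length - (du cs).1) ++ (du cs).2) := by
  induction cs with
  | nil => intro l _; simp [du]
  | cons c cs ih =>
    intro l hlen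
    by_cases hc : c ∈ ['<', '(', '[', '{']
    · rw [List.foldl_cons, show csStepA (some l) c = some (l ++ [c]) from by simp [csStepA, hc]]
      by_cases hk : (du cs).1 = 0
      · have e1 : (du (c :: cs)).1 = 0 := by
          rw [show du (c :: cs) = duStep c (du cs) from rfl, duStep, if_pos hc, if_pos hk]
        have e2 : (du (c :: cs)).2 = c :: (du cs).2 := by
          rw [show du (c :: cs) = duStep c (du cs) from rfl, duStep, if_pos hc, if_pos hk]
        rw [ih (l ++ [c]) (by simp [hk]), e1, e2, hk]
        rw [List.take_of_length_le (by simp)]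
        simp
      · have e1 : (du (c :: cs)).1 = (du cs).1 - 1 := by
          rw [show du (c :: cs) = duStep c (du cs) from rfl, duStep, if_pos hc, if_neg hk]
        have e2 : (du (c :: cs)).2 = (du cs).2 := by
          rw [show du (c :: cs) = duStep c (du cs) from rfl, duStep, if_pos hc, if_neg hk]
        rw [e1] at hlen
        rw [ih (l ++ [c]) (by simp only [List.length_append, List.length_cons, List.length_nil]; omega),
          e1, e2, List.length_append, List.length_singleton,
          List.take_append_of_le_length (by omega)]
        have : l.length + 1 - (du cs).1 = l.length - ((du cs).1 - 1) := by omega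
        rw [this]
    · have e1 : (du (c :: cs)).1 = (du cs).1 + 1 := by
        rw [show du (c :: cs) = duStep c (du cs) from rfl, duStep, if_neg hc]
      have e2 : (du (c :: cs)).2 = (du cs).2 := by
        rw [show du (c :: cs) = duStep c (du cs) from rfl, duStep, if_neg hc]
      rw [e1] at hlen
      rcases l.eq_nil_or_concat with rfl | ⟨l', a, rfl⟩
      · simp at hlen
      · simp only [List.concat_eq_append] at *
        rw [List.foldl_cons, show csStepA (some (l' ++ [a])) c = some l' from by
          simp [csStepA, hc, PySem.List.pop?_last]]
        rw [ih l' (by simp at hlen; omega), e1, e2, List.length_append, List.length_singleton,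
          List.take_append_of_le_length (by omega)]
        have : l'.length - (du cs).1 = l'.length + 1 - ((du cs).1 + 1) := by omega
        rw [this]

-- conversely, a deficit larger than the stack makes A hit the empty-stack pop
theorem csA_underflow (cs : List Char) : ∀ (l : List Char), l.length < (du cs).1 →
    cs.foldl csStepA (some l) = none := by
  induction cs with
  | nil => intro l h; simp [du] at h
  | cons c cs ih =>
    intro l hlen
    by_cases hc : c ∈ ['<', '(', '[', '{']
    · rw [List.foldl_cons, show csStepA (some l) c = some (l ++ [c]) from by simp [csStepA, hc]]
      apply ih
      by_cases hk : (du cs).1 = 0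
      · have e1 : (du (c :: cs)).1 = 0 := by
          rw [show du (c :: cs) = duStep c (du cs) from rfl, duStep, if_pos hc, if_pos hk]
        rw [e1] at hlen
        simp at hlen
      · have e1 : (du (c :: cs)).1 = (du cs).1 - 1 := by
          rw [show du (c :: cs) = duStep c (du cs) from rfl, duStep, if_pos hc, if_neg hk]
        rw [e1] at hlen
        simp only [List.length_append, List.length_singleton]
        omega
    · have e1 : (du (c :: cs)).1 = (du cs).1 + 1 := by
        rw [show du (c :: cs) = duStep c (du cs) from rfl, duStep, if_neg hc]
      rw [e1] at hlen
      rcases l.eq_nil_or_concat with rfl | ⟨l', a, rfl⟩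
      · rw [List.foldl_cons, show csStepA (some ([] : List Char)) c = none from by
          simp [csStepA, hc, PySem.List.pop?], csStepA_none]
      · simp only [List.concat_eq_append] at *
        rw [List.foldl_cons, show csStepA (some (l' ++ [a])) c = some l' from by
          simp [csStepA, hc, PySem.List.pop?_last]]
        exact ih l' (by simp at hlen; omega)

-- A never hits the empty-stack pop under the prefix condition
theorem cs_pre_some (cs : List Char)
    (h : ∀ n : Nat, n ≤ cs.length → n ≤ 2 * (cs.take n).countP (fun c => decide (c ∈ ['<', '(', '[', '{']))) :
    (du cs).1 = 0 := by
  by_contra hk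
  have h0 : cs.foldl csStepA (some []) = none := csA_underflow cs [] (by simp; omega)
  -- but the prefix condition forbids underflow: show foldl from [] is some via induction on deficit
  -- derive a contradiction by strong induction: we prove foldl ≠ none directly
  have : cs.foldl csStepA (some []) ≠ none := by
    clear h0 hk
    suffices h' : ∀ (l : List Char),
        (∀ n : Nat, n ≤ cs.length → n ≤ 2 * (cs.take n).countP (fun c => decide (c ∈ ['<', '(', '[', '{'])) + l.length) →
        cs.foldl csStepA (some l) ≠ none from
      h' [] (fun n hn => by simpa using h n hn)
    clear h
    induction cs with
    | nil => intro l _; simp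
    | cons c cs ih =>
      intro l h
      by_cases hc : c ∈ ['<', '(', '[', '{']
      · rw [List.foldl_cons, show csStepA (some l) c = some (l ++ [c]) from by simp [csStepA, hc]]
        apply ih
        intro n hn
        have hpc : (decide (c ∈ ['<', '(', '[', '{']) = true) := by simpa using hc
        have := h (n + 1) (by simpa using hn)
        simp only [List.take_succ_cons, List.countP_cons, hpc, reduceIte] at this
        simp only [List.length_append, List.length_cons, List.length_nil]
        omega
      · have h1 := h 1 (by simp)
        simp only [List.take_succ_cons, List.take_zero, List.countP_cons, List.countP_nil] at h1
        simp [hc] at h1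
        rcases l.eq_nil_or_concat with rfl | ⟨l', a, rfl⟩
        · simp at h1
        · simp only [List.concat_eq_append] at *
          rw [List.foldl_cons, show csStepA (some (l' ++ [a])) c = some l' from by
            simp [csStepA, hc, PySem.List.pop?_last]]
          apply ih
          intro n hn
          have hpc : (decide (c ∈ ['<', '(', '[', '{']) = false) := by simpa using hc
          have := h (n + 1) (by simpa using hn)
          simp only [List.take_succ_cons, List.countP_cons, hpc, Bool.false_eq_true, if_false,
            List.length_append, List.length_cons, List.length_nil] at this
          omega
  exact this h0

theorem cs_sol_eq (l : List Char) : ∀ (acc : List Char), (∀ c ∈ l, c ∈ ['<', '(', '[', '{']) →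
    l.foldl csSolStep acc = acc ++ l.map csClose := by
  induction l with
  | nil => intro acc _; simp
  | cons c l ih =>
    intro acc h
    have hc := h c (by simp)
    have hrest : ∀ x ∈ l, x ∈ ['<', '(', '[', '{'] := fun x hx => h x (by simp [hx])
    fin_cases hc <;> simp [csSolStep, csClose, ih _ hrest]

theorem cs_score_eq (l : List Char) : ∀ (a : Int), (∀ c ∈ l, c ∈ ['<', '(', '[', '{']) →
    (l.map csClose).foldl csScoreStep a = l.foldl (fun s c => s * 5 + csVal c) a := by
  induction l with
  | nil => intro a _; rfl
  | cons c l ih =>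
    intro a h
    have hc := h c (by simp)
    have hrest : ∀ x ∈ l, x ∈ ['<', '(', '[', '{'] := fun x hx => h x (by simp [hx])
    fin_cases hc <;> simp [csScoreStep, csClose, csVal, ih _ hrest]

-- ===== VERDICT (by name: the statement is the Claim_ definition above) =====
theorem completion_score_spec : Claim_equal_completion_score := by
  intro line dom pre
  unfold Spec_completion_score completion_score completion_score_alt
  have hd0 : (du line.toList).1 = 0 := cs_pre_some line.toList (fun n hn => pre n hn)
  have hA := csA_du line.toList [] (by omega)
  simp only [hd0, List.length_nil, Nat.zero_sub, List.take_zero, List.nil_append] at hA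
  rw [hA]
  have hop : ∀ c ∈ ((du line.toList).2).reverse, c ∈ ['<', '(', '[', '{'] :=
    fun c hc => du_openers line.toList c (List.mem_reverse.1 hc)
  simp only
  rw [cs_sol_eq _ [] hop, List.nil_append, cs_score_eq _ 0 hop]
  have hB : line.toList.reverse.foldl csStepR ((0 : Int), (0 : Int))
      = (((du line.toList).1 : Int), hscore (du line.toList).2) := by
    rw [List.foldl_reverse]; exact csStepR_char line.toList
  rw [hB, hd0]
  simp [hscore]
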